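-- pv_equiv track=rewrite | github.com/Ericshunjie/algorithm | 贪心算法/763划分字母区间.py | minWordIntervals
-- ===== SOURCE A (Python) =====
-- def minWordIntervals(S):
--
--     ## 贪心：找到一个区间内所有字母的右边界的最大值
--     n = len(S)
--     word_map = {}
--     for i in range(n):
--         word_map[S[i]] = i
--     start = 0
--     end = word_map[S[0]]
--     result = []
--     for i in range(n):
--         end = max(end, word_map[S[i]])
--         if i == end:
--             result.append(i - start + 1)
--             start = i + 1
--     return result
-- ===== SOURCE B (Python) =====
-- def minWordIntervals(S):
--     # A position i ends a part exactly when no letter seen so far occurs again later.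
--     cuts = [i for i in range(len(S)) if all(c not in S[i + 1:] for c in S[:i + 1])]
--     return [b - a for a, b in zip([-1] + cuts, cuts)]
-- ===== Notes on version B (the rewrite author's own statement) =====
-- stated objective: alternative
-- what changed: Replaces A's single greedy pass (last-occurrence dict plus running right edge and start/result accumulators) by a direct characterisation: a position ends a part iff no character of the prefix occurs in the suffix; the answer is the zip-difference of these cut positions.
import Mathlib
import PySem

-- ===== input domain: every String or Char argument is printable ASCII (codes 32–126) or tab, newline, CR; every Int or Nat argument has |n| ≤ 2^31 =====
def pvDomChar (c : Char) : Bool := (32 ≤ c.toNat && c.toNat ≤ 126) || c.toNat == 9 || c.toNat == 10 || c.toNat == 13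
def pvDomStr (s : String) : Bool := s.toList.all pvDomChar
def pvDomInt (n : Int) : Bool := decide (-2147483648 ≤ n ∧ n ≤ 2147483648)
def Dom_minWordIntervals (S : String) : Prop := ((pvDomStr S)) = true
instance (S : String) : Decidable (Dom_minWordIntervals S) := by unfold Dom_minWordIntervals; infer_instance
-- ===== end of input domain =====

-- B replaces A's single greedy pass (last-occurrence dict + running right edge) by a direct
-- characterisation: a position ends a part iff no character of the prefix occurs in the suffix;
-- the lengths are the zip-differences of those cut positions. Objective: alternative (B is O(n^2), not faster).

-- ===== PORT A =====
def minWordIntervals (S : String) : List Int :=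
  let L := S.toList
  let n : Int := (L.length : Int)
  -- word_map[S[i]] = i  (index i is always in range; the pyGetD default is never used)
  let word_map : PySem.Dict Char Int :=
    (PySem.List.pyRange 0 n 1).foldl
      (fun d i => d.insert (PySem.List.pyGetD L i ' ') i) PySem.Dict.empty
  -- end = word_map[S[0]] : on the empty string Python raises IndexError here (excluded by Pre_);
  -- otherwise index and key are always present, so the defaults are never used
  let e0 : Int := word_map.getD (PySem.List.pyGetD L 0 ' ') 0
  let fin := (PySem.List.pyRange 0 n 1).foldl
    (fun (st : Int × Int × List Int) i =>
      let e := max st.2.1 (word_map.getD (PySem.List.pyGetD L i ' ') 0)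
      if i == e then (i + 1, e, st.2.2 ++ [i - st.1 + 1]) else (st.1, e, st.2.2))
    (0, e0, ([] : List Int))
  fin.2.2

-- ===== PORT B =====
def minWordIntervals_alt (S : String) : List Int :=
  let L := S.toList
  let cuts : List Int := (PySem.List.pyRange 0 (L.length : Int) 1).filter
    (fun i => (PySem.List.slice L none (some (i + 1))).all
      (fun c => !((PySem.List.slice L (some (i + 1)) none).contains c)))
  (List.zip ((-1 : Int) :: cuts) cuts).map (fun p => p.2 - p.1)

-- ===== PRECONDITION & SPEC =====
-- Pre_ excludes exactly the empty string, on which A raises IndexError at word_map[S[0]].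
def Pre_minWordIntervals (S : String) : Prop := S ≠ ""
instance (S : String) : Decidable (Pre_minWordIntervals S) := by unfold Pre_minWordIntervals; infer_instance
def pvWitness_minWordIntervals : String := "ababcbaca"

def Spec_minWordIntervals (S : String) (out : List Int) : Prop := out = minWordIntervals_alt S
instance (S : String) (out : List Int) : Decidable (Spec_minWordIntervals S out) := by unfold Spec_minWordIntervals; infer_instance

-- ===== CLAIM (what is proved, stated in full; the proofs are below) =====
def Claim_equal_minWordIntervals : Prop := ∀ (S : String), Dom_minWordIntervals S → Pre_minWordIntervals S → Spec_minWordIntervals S (minWordIntervals S)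

-- ===== LEMMAS AND PROOFS =====

-- last occurrence of c among the first m characters of L (as A's dict computes it)
def pvLo (L : List Char) : Nat → Char → Option Nat
  | 0, _ => none
  | m + 1, c => if L.getD m ' ' = c then some m else pvLo L m c

-- A's dict value: last occurrence in the whole list, defaulting to 0
def pvLast (L : List Char) (c : Char) : Int := ((pvLo L L.length c).map (fun j => (j : Int))).getD 0

-- A's running right edge after iteration k
def pvE (L : List Char) : Nat → Int
  | 0 => pvLast L (L.getD 0 ' ')
  | k + 1 => max (pvE L k) (pvLast L (L.getD k ' '))

-- the partition lengths produced from position k onward, current part starting at s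
def pvParts (L : List Char) (k : Nat) (s : Int) : List Int :=
  if h : k < L.length then
    (if (k : Int) = pvE L (k + 1) then ((k : Int) - s + 1) :: pvParts L (k + 1) ((k : Int) + 1)
     else pvParts L (k + 1) s)
  else []
  termination_by L.length - k

-- zip-difference of the cut list
def pvZd : Int → List Int → List Int
  | _, [] => []
  | p, c :: cs => (c - p) :: pvZd c cs

theorem pvLo_some {L : List Char} {m : Nat} {c : Char} {j : Nat}
    (h : pvLo L m c = some j) : j < m ∧ L.getD j ' ' = c := by
  induction m with
  | zero => simp [pvLo] at h
  | succ m ih =>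
    simp only [pvLo] at h
    split at h
    · rename_i he; cases h; exact ⟨by omega, by assumption⟩
    · obtain ⟨h1, h2⟩ := ih h; exact ⟨Nat.lt_succ_of_lt h1, h2⟩

theorem pvLo_ge {L : List Char} {m j : Nat} {c : Char}
    (hj : j < m) (hc : L.getD j ' ' = c) : ∃ k, pvLo L m c = some k ∧ j ≤ k := by
  induction m with
  | zero => omega
  | succ m ih =>
    simp only [pvLo]
    by_cases he : L.getD m ' ' = c
    · exact ⟨m, by simp only [if_pos he], by omega⟩
    · have hj' : j < m := by
        rcases Nat.lt_succ_iff_lt_or_eq.mp hj with h | h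
        · exact h
        · exact absurd (h ▸ hc) he
      obtain ⟨k, hk, hjk⟩ := ih hj'
      exact ⟨k, by simp only [if_neg he, hk], hjk⟩

theorem pvLo_last {L : List Char} {m j k : Nat} {c : Char}
    (h : pvLo L m c = some j) (hk1 : j < k) (hk2 : k < m) : L.getD k ' ' ≠ c := by
  induction m with
  | zero => omega
  | succ m ih =>
    simp only [pvLo] at h
    split at h
    · cases h; omega
    · rename_i he
      rcases Nat.lt_succ_iff_lt_or_eq.mp hk2 with h2 | h2
      · exact ih h h2
      · exact h2 ▸ he


-- the dict A builds maps c to its last occurrence index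
theorem pvWm_get (L : List Char) (m : Nat) (c : Char) :
    (((List.range m).foldl (fun d j => d.insert (L.getD j ' ') ((j : Nat) : Int)) PySem.Dict.empty).get? c)
      = (pvLo L m c).map (fun j => (j : Int)) := by
  induction m with
  | zero => simp [pvLo, PySem.Dict.get?_empty]
  | succ m ih =>
    rw [List.range_succ, List.foldl_append]
    simp only [List.foldl_cons, List.foldl_nil, pvLo]
    rw [PySem.Dict.get?_insert]
    by_cases hc : L.getD m ' ' = c
    · rw [if_pos hc, if_pos hc.symm]; rfl
    · rw [if_neg hc, if_neg (Ne.symm hc), ih]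

theorem pvDict_getD (L : List Char) (c : Char) :
    ((PySem.List.pyRange 0 ((L.length : Nat) : Int) 1).foldl
        (fun d i => d.insert (PySem.List.pyGetD L i ' ') i) PySem.Dict.empty).getD c 0
      = pvLast L c := by
  rw [PySem.List.pyRange_zero_natCast, List.foldl_map]
  simp only [PySem.List.pyGetD_natCast]
  rw [PySem.Dict.getD_eq_get?_getD, pvWm_get]
  rfl

-- c ∈ L.drop m, index form
theorem pvMem_drop_iff (L : List Char) (m : Nat) (c : Char) :
    c ∈ L.drop m ↔ ∃ u, m + u < L.length ∧ L.getD (m + u) ' ' = c := by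
  rw [List.mem_iff_getElem]
  constructor
  · rintro ⟨i, hi, hget⟩
    have hl : i < L.length - m := by simpa using hi
    refine ⟨i, by omega, ?_⟩
    rw [List.getD_eq_getElem L ' ' (by omega), ← List.getElem_drop (h := hi)]
    exact hget
  · rintro ⟨u, hu, hget⟩
    refine ⟨u, by simp; omega, ?_⟩
    rw [List.getElem_drop, ← List.getD_eq_getElem L ' ' (by omega)]
    exact hget

theorem pvMem_take_iff (L : List Char) (m : Nat) (c : Char) :
    c ∈ L.take m ↔ ∃ j, j < m ∧ j < L.length ∧ L.getD j ' ' = c := by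
  rw [List.mem_iff_getElem]
  constructor
  · rintro ⟨i, hi, hget⟩
    have hl : i < min m L.length := by simpa using hi
    refine ⟨i, by omega, by omega, ?_⟩
    rw [List.getD_eq_getElem L ' ' (by omega), ← List.getElem_take (h := hi)]
    exact hget
  · rintro ⟨j, hj, hjl, hget⟩
    refine ⟨j, by simp; omega, ?_⟩
    rw [List.getElem_take, ← List.getD_eq_getElem L ' ' (by omega)]
    exact hget

-- the last occurrence of the character at a live index is at least that index
theorem pvE_ge (L : List Char) (k : Nat) (hk : k < L.length) : (k : Int) ≤ pvE L (k + 1) := by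
  obtain ⟨t, ht, hkt⟩ := pvLo_ge (L := L) (c := L.getD k ' ') hk rfl
  have : (k : Int) ≤ pvLast L (L.getD k ' ') := by
    unfold pvLast; rw [ht]; simp; exact_mod_cast hkt
  calc (k : Int) ≤ pvLast L (L.getD k ' ') := this
    _ ≤ pvE L (k + 1) := by unfold pvE; exact le_max_right _ _

theorem pvE_le_iff (L : List Char) (k : Nat) (m : Int) :
    pvE L (k + 1) ≤ m ↔ ∀ j, j ≤ k → pvLast L (L.getD j ' ') ≤ m := by
  induction k with
  | zero =>
    unfold pvE pvE
    rw [max_self]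
    constructor
    · intro h j hj; interval_cases j; exact h
    · intro h; exact h 0 le_rfl
  | succ k ih =>
    unfold pvE
    rw [max_le_iff, ih]
    constructor
    · rintro ⟨h1, h2⟩ j hj
      by_cases h : j ≤ k
      · exact h1 j h
      · have hje : j = k + 1 := by omega
        exact hje ▸ h2
    · intro h
      exact ⟨fun j hj => h j (by omega), h (k + 1) le_rfl⟩

theorem pvLast_le_iff (L : List Char) (j k : Nat) (hj : j < L.length) :
    pvLast L (L.getD j ' ') ≤ (k : Int) ↔ L.getD j ' ' ∉ L.drop (k + 1) := by
  obtain ⟨t, ht, hjt⟩ := pvLo_ge (L := L) (c := L.getD j ' ') hj rfl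
  have hlast : pvLast L (L.getD j ' ') = (t : Int) := by unfold pvLast; rw [ht]; rfl
  obtain ⟨htl, _⟩ := pvLo_some ht
  rw [hlast, pvMem_drop_iff]
  constructor
  · rintro hle ⟨u, hu, hget⟩
    have htk : t ≤ k := by exact_mod_cast hle
    exact pvLo_last ht (by omega) hu hget
  · intro hnot
    by_contra hgt
    have htk : k < t := by omega
    exact hnot ⟨t - (k + 1), by omega, by rw [Nat.add_sub_cancel' (by omega)]; exact (pvLo_some ht).2⟩

-- a position is a cut for A iff no prefix character recurs in the suffix
theorem pvCut_iff (L : List Char) (k : Nat) (hk : k < L.length) :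
    ((k : Int) = pvE L (k + 1)) ↔
      ((L.take (k + 1)).all (fun c => !((L.drop (k + 1)).contains c)) = true) := by
  rw [List.all_eq_true]
  constructor
  · intro he c hc
    rw [pvMem_take_iff] at hc
    obtain ⟨j, hj, hjl, rfl⟩ := hc
    have : pvLast L (L.getD j ' ') ≤ (k : Int) :=
      (pvE_le_iff L k (k : Int)).mp (le_of_eq he.symm) j (by omega)
    rw [pvLast_le_iff L j k hjl] at this
    simpa using this
  · intro hall
    refine le_antisymm (pvE_ge L k hk) ?_
    rw [pvE_le_iff]
    intro j hj
    rw [pvLast_le_iff L j k (by omega)]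
    have : L.getD j ' ' ∈ L.take (k + 1) := by
      rw [pvMem_take_iff]; exact ⟨j, by omega, by omega, rfl⟩
    have := hall _ this
    simpa using this

-- A's loop, from index k on, produces exactly the remaining parts
theorem pvLoopA (L : List Char) (wm : PySem.Dict Char Int)
    (hwm : ∀ c, wm.getD c 0 = pvLast L c) :
    ∀ fuel k s r, L.length - k = fuel → k ≤ L.length →
    ((PySem.List.pyRange ((k : Nat) : Int) ((L.length : Nat) : Int) 1).foldl
        (fun (st : Int × Int × List Int) i =>
          let e := max st.2.1 (wm.getD (PySem.List.pyGetD L i ' ') 0)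
          if i == e then (i + 1, e, st.2.2 ++ [i - st.1 + 1]) else (st.1, e, st.2.2))
        (s, pvE L k, r)).2.2 = r ++ pvParts L k s := by
  intro fuel
  induction fuel with
  | zero =>
    intro k s r hf hk
    have hkl : k = L.length := by omega
    rw [PySem.List.pyRange_one_eq_nil (by exact_mod_cast le_of_eq hkl.symm)]
    rw [pvParts.eq_def, dif_neg (by omega)]
    simp
  | succ fuel ih =>
    intro k s r hf hk
    have hkl : k < L.length := by omega
    rw [PySem.List.pyRange_one_cons (by exact_mod_cast hkl), List.foldl_cons]
    have he : max (pvE L k) (pvLast L (L.getD k ' ')) = pvE L (k + 1) := rfl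
    have hcast : ((k : Nat) : Int) + 1 = (((k + 1 : Nat)) : Int) := by push_cast; ring
    simp only [PySem.List.pyGetD_natCast, hwm, beq_iff_eq] at ih ⊢
    rw [he]
    by_cases hcut : ((k : Nat) : Int) = pvE L (k + 1)
    · rw [if_pos hcut, pvParts.eq_def, dif_pos hkl, if_pos hcut]
      rw [hcast, ih (k + 1) (((k + 1 : Nat) : Int)) (r ++ [((k : Nat) : Int) - s + 1]) (by omega) (by omega)]
      simp
    · rw [if_neg hcut, pvParts.eq_def, dif_pos hkl, if_neg hcut]
      rw [hcast, ih (k + 1) s r (by omega) (by omega)]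

-- zip with the shifted list is the zip-difference
theorem pvZip_eq_zd (cs : List Int) : ∀ p, (List.zip (p :: cs) cs).map (fun q => q.2 - q.1) = pvZd p cs := by
  induction cs with
  | nil => intro p; rfl
  | cons c cs ih => intro p; simp only [List.zip_cons_cons, List.map_cons, pvZd]; rw [ih]

-- B's filtered cut list, zip-differenced, equals the same parts
theorem pvLoopB (L : List Char) :
    ∀ fuel k s, L.length - k = fuel → k ≤ L.length →
    pvZd (s - 1)
      ((PySem.List.pyRange ((k : Nat) : Int) ((L.length : Nat) : Int) 1).filter
        (fun i => (PySem.List.slice L none (some (i + 1))).all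
          (fun c => !((PySem.List.slice L (some (i + 1)) none).contains c))))
      = pvParts L k s := by
  intro fuel
  induction fuel with
  | zero =>
    intro k s hf hk
    have hkl : k = L.length := by omega
    rw [PySem.List.pyRange_one_eq_nil (by exact_mod_cast le_of_eq hkl.symm)]
    rw [pvParts.eq_def, dif_neg (by omega)]
    rfl
  | succ fuel ih =>
    intro k s hf hk
    have hkl : k < L.length := by omega
    rw [PySem.List.pyRange_one_cons (by exact_mod_cast hkl), List.filter_cons]
    have hcast : ((k : Nat) : Int) + 1 = (((k + 1 : Nat)) : Int) := by push_cast; ring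
    have hq : ((PySem.List.slice L none (some (((k : Nat) : Int) + 1))).all
          (fun c => !((PySem.List.slice L (some (((k : Nat) : Int) + 1))).contains c)))
        = (L.take (k + 1)).all (fun c => !((L.drop (k + 1)).contains c)) := by
      rw [hcast, PySem.List.slice_to_natCast, PySem.List.slice_from_natCast]
    rw [pvParts.eq_def, dif_pos hkl]
    by_cases hcut : ((k : Nat) : Int) = pvE L (k + 1)
    · have hqt : ((L.take (k + 1)).all (fun c => !((L.drop (k + 1)).contains c))) = true :=
        (pvCut_iff L k hkl).mp hcut
      rw [hq, hqt, if_pos rfl, if_pos hcut]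
      simp only [pvZd]
      have hrec := ih (k + 1) (((k : Nat) : Int) + 1) (by omega) (by omega)
      rw [show ((k : Nat) : Int) + 1 - 1 = ((k : Nat) : Int) from by ring, ← hcast] at hrec
      rw [hrec]
      congr 1
      ring
    · have hqt : ((L.take (k + 1)).all (fun c => !((L.drop (k + 1)).contains c))) = false := by
        cases h : ((L.take (k + 1)).all (fun c => !((L.drop (k + 1)).contains c)))
        · rfl
        · exact absurd ((pvCut_iff L k hkl).mpr h) hcut
      rw [hq, hqt, if_neg (by simp), if_neg hcut]
      have hrec := ih (k + 1) s (by omega) (by omega)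
      rw [← hcast] at hrec
      exact hrec

-- ===== VERDICT (by name: the statement is the Claim_ definition above) =====
theorem minWordIntervals_spec : Claim_equal_minWordIntervals := by
  intro S hdom hpre
  unfold Spec_minWordIntervals minWordIntervals minWordIntervals_alt
  simp only []
  rw [pvZip_eq_zd]
  have hA := pvLoopA S.toList
      ((PySem.List.pyRange 0 ((S.toList.length : Nat) : Int) 1).foldl
        (fun d i => d.insert (PySem.List.pyGetD S.toList i ' ') i) PySem.Dict.empty)
      (fun c => pvDict_getD S.toList c)
      (S.toList.length) 0 0 [] (by omega) (by omega)
  have hB := pvLoopB S.toList (S.toList.length) 0 0 (by omega) (by omega)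
  have he0 : ((PySem.List.pyRange 0 ((S.toList.length : Nat) : Int) 1).foldl
        (fun d i => d.insert (PySem.List.pyGetD S.toList i ' ') i) PySem.Dict.empty).getD
        (PySem.List.pyGetD S.toList 0 ' ') 0 = pvE S.toList 0 := by
    rw [pvDict_getD, PySem.List.pyGetD_ofNat']
    rfl
  simp only [Nat.cast_zero] at hA hB
  rw [show ((0 : Int) - 1) = (-1 : Int) from by norm_num] at hB
  rw [he0, hA, List.nil_append, ← hB]
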